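-- pv_equiv track=rewrite | github.com/semajson/aoc2020 | day24/part2.py | convert_dirs_to_coords
-- ===== SOURCE A (Python) =====
-- def convert_dirs_to_coords(directions):
--     # Directions are relative to a base coord, call that 0,0
--     coords = [0, 0]
--
--     for direction in directions:
--         if direction == "e":
--             coords[0] += 1
--         elif direction == "w":
--             coords[0] -= 1
--         elif direction == "ne":
--             coords[1] += 1
--         elif direction == "sw":
--             coords[1] -= 1
--         elif direction == "se":
--             coords[0] += 1
--             coords[1] -= 1
--         elif direction == "nw":
--             coords[0] -= 1
--             coords[1] += 1
--     return tuple(coords)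
-- ===== SOURCE B (Python) =====
-- from collections import Counter
--
-- def convert_dirs_to_coords(directions):
--     c = Counter(directions)
--     x = c["e"] - c["w"] + c["se"] - c["nw"]
--     y = c["ne"] - c["sw"] - c["se"] + c["nw"]
--     return (x, y)
-- ===== Notes on version B (the rewrite author's own statement) =====
-- stated objective: idiomatic
-- what changed: Replaced the per-element branch-and-mutate loop by a Counter tabulation followed by closed-form linear combinations of the six direction counts.
import Mathlib
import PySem

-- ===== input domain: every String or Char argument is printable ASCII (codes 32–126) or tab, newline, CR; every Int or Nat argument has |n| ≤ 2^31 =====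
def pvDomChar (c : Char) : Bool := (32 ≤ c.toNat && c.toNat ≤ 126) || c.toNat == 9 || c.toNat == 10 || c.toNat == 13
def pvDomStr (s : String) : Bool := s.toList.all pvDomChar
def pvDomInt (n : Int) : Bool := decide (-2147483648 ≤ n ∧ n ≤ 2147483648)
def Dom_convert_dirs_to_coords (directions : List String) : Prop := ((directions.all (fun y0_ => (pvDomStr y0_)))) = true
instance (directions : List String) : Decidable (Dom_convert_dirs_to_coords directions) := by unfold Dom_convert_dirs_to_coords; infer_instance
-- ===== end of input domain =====

-- B replaces A's per-element branch-and-mutate loop by a Counter tabulation plus a closed-form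
-- linear combination of the six counts (idiomatic; same O(n) cost).

-- ===== PORT A =====
def convert_dirs_to_coords (directions : List String) : Int × Int :=
  let coords : Int × Int :=
    directions.foldl (fun coords direction =>
      if direction == "e" then (coords.1 + 1, coords.2)
      else if direction == "w" then (coords.1 - 1, coords.2)
      else if direction == "ne" then (coords.1, coords.2 + 1)
      else if direction == "sw" then (coords.1, coords.2 - 1)
      else if direction == "se" then (coords.1 + 1, coords.2 - 1)
      else if direction == "nw" then (coords.1 - 1, coords.2 + 1)
      else coords) (0, 0)
  coords

-- ===== PORT B =====
def convert_dirs_to_coords_alt (directions : List String) : Int × Int :=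
  let c := PySem.Dict.counter directions
  let x := c.getD "e" 0 - c.getD "w" 0 + c.getD "se" 0 - c.getD "nw" 0
  let y := c.getD "ne" 0 - c.getD "sw" 0 - c.getD "se" 0 + c.getD "nw" 0
  (x, y)

-- ===== PRECONDITION & SPEC =====
def Spec_convert_dirs_to_coords (directions : List String) (out : Int × Int) : Prop := out = convert_dirs_to_coords_alt directions
instance (directions : List String) (out : Int × Int) : Decidable (Spec_convert_dirs_to_coords directions out) := by unfold Spec_convert_dirs_to_coords; infer_instance

-- ===== CLAIM (what is proved, stated in full; the proofs are below) =====
def Claim_equal_convert_dirs_to_coords : Prop := ∀ (directions : List String), Dom_convert_dirs_to_coords directions → Spec_convert_dirs_to_coords directions (convert_dirs_to_coords directions)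

-- ===== LEMMAS AND PROOFS =====

set_option maxHeartbeats 1000000 in
theorem foldA_eq (l : List String) (a : Int × Int) :
    l.foldl (fun coords direction =>
      if direction == "e" then (coords.1 + 1, coords.2)
      else if direction == "w" then (coords.1 - 1, coords.2)
      else if direction == "ne" then (coords.1, coords.2 + 1)
      else if direction == "sw" then (coords.1, coords.2 - 1)
      else if direction == "se" then (coords.1 + 1, coords.2 - 1)
      else if direction == "nw" then (coords.1 - 1, coords.2 + 1)
      else coords) a
    = (a.1 + l.count "e" - l.count "w" + l.count "se" - l.count "nw",
       a.2 + l.count "ne" - l.count "sw" - l.count "se" + l.count "nw") := by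
  induction l generalizing a with
  | nil => simp
  | cons d t ih =>
    simp only [List.foldl_cons]
    rw [ih]
    simp only [List.count_cons, beq_iff_eq]
    by_cases h1 : d = "e"
    · subst h1; simp; omega
    by_cases h2 : d = "w"
    · subst h2; simp only [if_neg h1]; simp; omega
    by_cases h3 : d = "ne"
    · subst h3; simp only [if_neg h1, if_neg h2]; simp; omega
    by_cases h4 : d = "sw"
    · subst h4; simp only [if_neg h1, if_neg h2, if_neg h3]; simp; omega
    by_cases h5 : d = "se"
    · subst h5; simp only [if_neg h1, if_neg h2, if_neg h3, if_neg h4]; simp; omega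
    by_cases h6 : d = "nw"
    · subst h6; simp only [if_neg h1, if_neg h2, if_neg h3, if_neg h4, if_neg h5]; simp; omega
    · simp only [if_neg h1, if_neg h2, if_neg h3, if_neg h4, if_neg h5, if_neg h6]
      simp

-- ===== VERDICT (by name: the statement is the Claim_ definition above) =====
theorem convert_dirs_to_coords_spec : Claim_equal_convert_dirs_to_coords := by
  intro directions _
  unfold Spec_convert_dirs_to_coords convert_dirs_to_coords convert_dirs_to_coords_alt
  simp only [foldA_eq, PySem.Dict.getD_counter, Prod.mk.injEq]
  omega
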